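-- pv_equiv track=rewrite | github.com/facundoPri/algoritmo-programacion-i-essaya | guia_de_ejercicios/ej_6/ej6_3.py | remplazar_espacios
-- ===== SOURCE A (Python) =====
-- def remplazar_espacios(cadena, separador, cantidad):
--     """
--     Recibe una cadena y un separador
--     Devuelve la cadena pero remplazando los espacios por un separador
--     """
--     resultado = ""
--     reemplazos = 0
--     for indice in range(0, len(cadena)):
--         if reemplazos == cantidad:
--             return resultado + cadena[indice:]
--         elif cadena[indice] == " ":
--             resultado += separador
--             reemplazos += 1
--         else:
--             resultado += cadena[indice]
--     return resultado
-- ===== SOURCE B (Python) =====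
-- def remplazar_espacios(cadena, separador, cantidad):
--     return separador.join(cadena.split(" ", cantidad))
-- ===== Notes on version B (the rewrite author's own statement) =====
-- stated objective: faster
-- what changed: Replaces the per-character accumulate-and-count scan (with an early return mid-loop) by the one-liner separador.join(cadena.split(" ", cantidad)), letting str.split's maxsplit do the counting.
import Mathlib
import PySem

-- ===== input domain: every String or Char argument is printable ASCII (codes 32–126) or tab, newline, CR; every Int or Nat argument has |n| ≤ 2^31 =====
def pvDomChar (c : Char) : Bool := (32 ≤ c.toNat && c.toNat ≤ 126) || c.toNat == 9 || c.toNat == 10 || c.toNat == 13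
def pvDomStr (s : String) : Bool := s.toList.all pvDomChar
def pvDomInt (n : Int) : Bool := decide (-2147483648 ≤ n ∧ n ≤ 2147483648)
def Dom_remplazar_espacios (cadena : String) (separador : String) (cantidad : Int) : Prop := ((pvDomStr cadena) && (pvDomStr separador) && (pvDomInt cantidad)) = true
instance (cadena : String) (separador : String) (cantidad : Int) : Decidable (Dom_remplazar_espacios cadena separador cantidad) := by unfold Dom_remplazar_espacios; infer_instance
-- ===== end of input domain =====

-- B replaces A's per-character accumulate-and-count loop by split(" ", cantidad) + join (idiomatic one-liner); return values proved equal on all inputs.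

-- ===== PORT A =====
-- A's for-loop over indices, transcribed as structural recursion on the remaining
-- characters; `resultado` and `reemplazos` are the loop state, the `reemplazos == cantidad`
-- early return becomes the first branch.
def replLoop (separador : List Char) (cantidad : Int) :
    List Char → List Char → Int → List Char
  | [], resultado, _ => resultado
  | c :: rest, resultado, reemplazos =>
    if reemplazos = cantidad then resultado ++ (c :: rest)
    else if c = ' ' then replLoop separador cantidad rest (resultado ++ separador) (reemplazos + 1)
    else replLoop separador cantidad rest (resultado ++ [c]) reemplazos

def remplazar_espacios (cadena : String) (separador : String) (cantidad : Int) : String :=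
  String.ofList (replLoop separador.toList cantidad cadena.toList [] 0)

-- ===== PORT B =====
-- separador.join(cadena.split(" ", cantidad)); split(" ", …) never returns None (sep ≠ ""),
-- so .getD [] is just the unwrapping of the option.
def remplazar_espacios_alt (cadena : String) (separador : String) (cantidad : Int) : String :=
  PySem.Str.join separador ((PySem.Str.splitMax? cadena " " cantidad).getD [])

-- ===== PRECONDITION & SPEC =====
def Spec_remplazar_espacios (cadena : String) (separador : String) (cantidad : Int) (out : String) : Prop := out = remplazar_espacios_alt cadena separador cantidad
instance (cadena : String) (separador : String) (cantidad : Int) (out : String) : Decidable (Spec_remplazar_espacios cadena separador cantidad out) := by unfold Spec_remplazar_espacios; infer_instance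

-- ===== CLAIM (what is proved, stated in full; the proofs are below) =====
def Claim_equal_remplazar_espacios : Prop := ∀ (cadena : String) (separador : String) (cantidad : Int), Dom_remplazar_espacios cadena separador cantidad → Spec_remplazar_espacios cadena separador cantidad (remplazar_espacios cadena separador cantidad)

-- ===== LEMMAS AND PROOFS =====

-- prepend a char to the first piece
def splitCons (c : Char) : List (List Char) → List (List Char)
  | [] => [[c]]
  | p :: ps => (c :: p) :: ps

-- prepend a prefix to the first piece
def splitPre (pre : List Char) : List (List Char) → List (List Char)
  | [] => [pre]
  | p :: ps => (pre ++ p) :: ps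

-- Reference splitter: split on ' ' with an optional remaining-splits budget (none = unlimited).
def splitSp : Option Nat → List Char → List (List Char)
  | _, [] => [[]]
  | some 0, l => [l]
  | some (m+1), c :: rest =>
    if c = ' ' then [] :: splitSp (some m) rest else splitCons c (splitSp (some (m+1)) rest)
  | none, c :: rest =>
    if c = ' ' then [] :: splitSp none rest else splitCons c (splitSp none rest)

theorem splitSp_ne_nil (o : Option Nat) (l : List Char) : splitSp o l ≠ [] := by
  match o, l with
  | _, [] => simp [splitSp]
  | some 0, _ :: _ => simp [splitSp]
  | some (m+1), c :: rest =>
    simp only [splitSp]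
    split
    · simp
    · cases h : splitSp (some (m+1)) rest <;> simp [splitCons]
  | none, c :: rest =>
    simp only [splitSp]
    split
    · simp
    · cases h : splitSp none rest <;> simp [splitCons]

theorem splitPre_splitCons (pre : List Char) (c : Char) (L : List (List Char)) :
    splitPre pre (splitCons c L) = splitPre (pre ++ [c]) L := by
  cases L <;> simp [splitPre, splitCons]

theorem splitPre_nil (L : List (List Char)) (h : L ≠ []) : splitPre [] L = L := by
  cases L with
  | nil => exact absurd rfl h
  | cons p ps => simp [splitPre]

theorem join_splitCons (sep : List Char) (c : Char) (L : List (List Char)) (h : L ≠ []) :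
    PySem.Chars.join sep (splitCons c L) = c :: PySem.Chars.join sep L := by
  cases L with
  | nil => exact absurd rfl h
  | cons p ps =>
    cases ps with
    | nil => simp [splitCons, PySem.Chars.join_singleton]
    | cons q qs => simp [splitCons, PySem.Chars.join_cons_cons]

theorem join_nil_cons (sep : List Char) (L : List (List Char)) (h : L ≠ []) :
    PySem.Chars.join sep ([] :: L) = sep ++ PySem.Chars.join sep L := by
  cases L with
  | nil => exact absurd rfl h
  | cons q qs => simp [PySem.Chars.join_cons_cons]

theorem goMax_eq (fuel : Nat) : ∀ (m : Nat) (l cur : List Char) (acc : List (List Char)),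
    l.length < fuel →
    PySem.Chars.splitOnMax.go [' '] fuel m l cur acc
      = acc.reverse ++ splitPre cur.reverse (splitSp (some m) l) := by
  induction fuel with
  | zero => intro m l cur acc h; omega
  | succ fuel ih =>
    intro m l cur acc h
    rw [PySem.Chars.splitOnMax.go.eq_def]
    cases l with
    | nil => simp [splitSp, splitPre]
    | cons c rest =>
      simp only []
      by_cases hm : m = 0
      · subst hm
        simp [splitSp, splitPre]
      · rw [if_neg hm]
        by_cases hc : c = ' '
        · subst hc
          rw [if_pos (by simp [List.isPrefixOf])]
          rw [ih (m - 1) _ _ _ (by simp at h ⊢; omega)]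
          obtain ⟨k, rfl⟩ : ∃ k, m = k + 1 := ⟨m - 1, by omega⟩
          simp only [Nat.add_sub_cancel, List.reverse_nil,
            show List.drop [' '].length (' ' :: rest) = rest from rfl]
          rw [splitPre_nil _ (splitSp_ne_nil _ _)]
          simp [splitSp, splitPre]
        · rw [if_neg (by simp [List.isPrefixOf]; intro hh; exact hc hh.symm)]
          rw [ih m rest (c :: cur) acc (by simp at h ⊢; omega)]
          obtain ⟨k, rfl⟩ : ∃ k, m = k + 1 := ⟨m - 1, by omega⟩
          simp only [splitSp, if_neg hc]
          rw [List.reverse_cons, splitPre_splitCons]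

theorem goPlain_eq (fuel : Nat) : ∀ (l cur : List Char) (acc : List (List Char)),
    l.length < fuel →
    PySem.Chars.splitOn.go [' '] fuel l cur acc
      = acc.reverse ++ splitPre cur.reverse (splitSp none l) := by
  induction fuel with
  | zero => intro l cur acc h; omega
  | succ fuel ih =>
    intro l cur acc h
    rw [PySem.Chars.splitOn.go.eq_def]
    cases l with
    | nil => simp [splitSp, splitPre]
    | cons c rest =>
      simp only []
      by_cases hc : c = ' '
      · subst hc
        rw [if_pos (by simp [List.isPrefixOf])]
        rw [ih _ _ _ (by simp at h ⊢; omega)]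
        simp only [List.reverse_nil, show List.drop [' '].length (' ' :: rest) = rest from rfl]
        rw [splitPre_nil _ (splitSp_ne_nil _ _)]
        simp [splitSp, splitPre]
      · rw [if_neg (by simp [List.isPrefixOf]; intro hh; exact hc hh.symm)]
        rw [ih rest (c :: cur) acc (by simp at h ⊢; omega)]
        simp only [splitSp, if_neg hc]
        rw [List.reverse_cons, splitPre_splitCons]

theorem splitOnMax_eq_splitSp (l : List Char) (cant : Int) :
    PySem.Chars.splitOnMax l [' '] cant
      = splitSp (if cant < 0 then none else some cant.toNat) l := by
  by_cases hneg : cant < 0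
  · rw [if_pos hneg]
    rw [show PySem.Chars.splitOnMax l [' '] cant = PySem.Chars.splitOn l [' '] from by
      simp [PySem.Chars.splitOnMax, hneg]]
    rw [PySem.Chars.splitOn, goPlain_eq _ _ _ _ (by omega)]
    simp [splitPre_nil _ (splitSp_ne_nil _ _)]
  · rw [if_neg hneg]
    rw [show PySem.Chars.splitOnMax l [' '] cant
        = PySem.Chars.splitOnMax.go [' '] (l.length + 1) cant.toNat l [] [] from by
      simp [PySem.Chars.splitOnMax, hneg]]
    rw [goMax_eq _ _ _ _ _ (by omega)]
    simp [splitPre_nil _ (splitSp_ne_nil _ _)]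

-- the limit seen by the loop when `reemplazos = reemp` replacements have been done
def limOf (cant reemp : Int) : Option Nat :=
  if cant < reemp then none else some (cant - reemp).toNat

theorem replLoop_eq (sep : List Char) (cant : Int) :
    ∀ (l res : List Char) (reemp : Int),
    replLoop sep cant l res reemp
      = res ++ PySem.Chars.join sep (splitSp (limOf cant reemp) l) := by
  intro l
  induction l with
  | nil =>
    intro res reemp
    simp [replLoop, splitSp, PySem.Chars.join_singleton]
  | cons c rest ih =>
    intro res reemp
    by_cases heq : reemp = cant
    · subst heq
      have : limOf reemp reemp = some 0 := by simp [limOf]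
      simp [replLoop, this, splitSp, PySem.Chars.join_singleton]
    · rw [show replLoop sep cant (c :: rest) res reemp
          = if c = ' ' then replLoop sep cant rest (res ++ sep) (reemp + 1)
            else replLoop sep cant rest (res ++ [c]) reemp from by
        simp [replLoop, heq]]
      by_cases hc : c = ' '
      · subst hc
        rw [if_pos rfl, ih]
        have hstep : splitSp (limOf cant reemp) (' ' :: rest)
            = [] :: splitSp (limOf cant (reemp + 1)) rest := by
          by_cases hlt : cant < reemp
          · have h1 : limOf cant reemp = none := by simp [limOf, hlt]
            have h2 : limOf cant (reemp + 1) = none := by simp [limOf]; omega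
            rw [h1, h2]; simp [splitSp]
          · have hgt : reemp < cant := by omega
            have h1 : limOf cant reemp = some ((cant - reemp - 1).toNat + 1) := by
              simp [limOf, hlt]; omega
            have h2 : limOf cant (reemp + 1) = some (cant - reemp - 1).toNat := by
              have : ¬ cant < reemp + 1 := by omega
              simp [limOf, this]; omega
            rw [h1, h2]; simp [splitSp]
        rw [hstep, join_nil_cons _ _ (splitSp_ne_nil _ _)]
        simp
      · rw [if_neg hc, ih]
        have hstep : splitSp (limOf cant reemp) (c :: rest)
            = splitCons c (splitSp (limOf cant reemp) rest) := by
          by_cases hlt : cant < reemp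
          · have h1 : limOf cant reemp = none := by simp [limOf, hlt]
            rw [h1]; simp [splitSp, hc]
          · have hgt : reemp < cant := by omega
            have h1 : limOf cant reemp = some ((cant - reemp - 1).toNat + 1) := by
              simp [limOf, hlt]; omega
            rw [h1]; simp [splitSp, hc]
        rw [hstep, join_splitCons _ _ _ (splitSp_ne_nil _ _)]
        simp

-- ===== VERDICT (by name: the statement is the Claim_ definition above) =====
theorem remplazar_espacios_spec : Claim_equal_remplazar_espacios := by
  intro cadena separador cantidad _
  unfold Spec_remplazar_espacios remplazar_espacios remplazar_espacios_alt
  rw [replLoop_eq]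
  have hlim : limOf cantidad 0 = if cantidad < 0 then none else some cantidad.toNat := by
    simp [limOf]
  rw [PySem.Str.splitMax?, PySem.Chars.splitMax?]
  rw [if_neg (by simp)]
  simp only [Option.map_some, Option.getD_some]
  rw [PySem.Str.join]
  have hsep : (" " : String).toList = [' '] := rfl
  rw [hsep, splitOnMax_eq_splitSp, ← hlim]
  congr 1
  simp [Function.comp_def]
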